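-- pv_equiv track=rewrite | github.com/ThomasKarpinski/Matura | matura2017_PR_Python/zad1_prostokąt.py | pole_p
-- ===== SOURCE A (Python) =====
-- def pole_p(A, p):
--     """
--     :param A: lista wartości
--     :param p: liczba pierwsza
--     :return: pole prostokąta
--     """
--     pierwsza, druga = 0, 0
--     for i in A:
--         if i % p != 0:
--             if i > pierwsza:
--                 druga = pierwsza
--                 pierwsza = i
--             elif i > druga:
--                 druga = i
--     S = pierwsza * druga
--     return S
-- ===== SOURCE B (Python) =====
-- def pole_p(A, p):
--     cand = sorted((i for i in A if i % p != 0 and i > 0), reverse=True)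
--     first = cand[0] if cand else 0
--     second = cand[1] if len(cand) > 1 else 0
--     return first * second
-- ===== Notes on version B (the rewrite author's own statement) =====
-- stated objective: simpler
-- what changed: Replaces the running top-two scan with a filter (positive non-multiples of p) followed by a descending sort, taking the first two elements padded with 0.
-- outside the precondition, e.g. on pole_p([1, 2, 3], 0): A raises ZeroDivisionError, B raises ZeroDivisionError
import Mathlib
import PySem

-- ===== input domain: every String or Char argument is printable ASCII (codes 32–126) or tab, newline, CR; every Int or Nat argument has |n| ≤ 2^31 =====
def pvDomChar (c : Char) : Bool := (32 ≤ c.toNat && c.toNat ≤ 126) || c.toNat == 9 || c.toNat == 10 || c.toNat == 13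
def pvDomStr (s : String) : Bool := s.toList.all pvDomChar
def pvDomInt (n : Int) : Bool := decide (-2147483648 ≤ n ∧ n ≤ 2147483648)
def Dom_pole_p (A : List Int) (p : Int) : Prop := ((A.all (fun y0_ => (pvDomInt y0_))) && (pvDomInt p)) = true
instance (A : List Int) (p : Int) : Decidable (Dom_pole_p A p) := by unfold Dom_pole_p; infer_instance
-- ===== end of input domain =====

-- B replaces A's running top-two scan by filter (positive non-multiples of p) + descending sort, taking the first two (padded with 0): simpler, not faster.

-- ===== PORT A =====
-- one iteration of A's loop: the running (pierwsza, druga) top-two state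
def pvStepA (p : Int) (s : Int × Int) (i : Int) : Int × Int :=
  if PySem.Int.mod i p ≠ 0 then
    if i > s.1 then (i, s.1)
    else if i > s.2 then (s.1, i)
    else s
  else s

def pole_p (A : List Int) (p : Int) : Int :=
  let s := A.foldl (pvStepA p) (0, 0)
  s.1 * s.2

-- ===== PORT B =====
def pole_p_alt (A : List Int) (p : Int) : Int :=
  let cand := PySem.List.sorted (A.filter (fun i => decide (PySem.Int.mod i p ≠ 0) && decide (i > 0))) (fun x => x) true
  let first : Int := match cand with | [] => 0 | x :: _ => x
  let second : Int := match cand with | _ :: y :: _ => y | _ => 0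
  first * second

-- ===== PRECONDITION & SPEC =====
-- Pre_ excludes only p = 0, on which Python's '%' raises ZeroDivisionError in both programs.
def Pre_pole_p (A : List Int) (p : Int) : Prop := p ≠ 0
instance (A : List Int) (p : Int) : Decidable (Pre_pole_p A p) := by unfold Pre_pole_p; infer_instance
def pvWitness_pole_p : List Int × Int := ([5, 7, 10, -3, 7], 5)
def Spec_pole_p (A : List Int) (p : Int) (out : Int) : Prop := out = pole_p_alt A p
instance (A : List Int) (p : Int) (out : Int) : Decidable (Spec_pole_p A p out) := by unfold Spec_pole_p; infer_instance

-- ===== CLAIM (what is proved, stated in full; the proofs are below) =====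
def Claim_equal_pole_p : Prop := ∀ (A : List Int) (p : Int), Dom_pole_p A p → Pre_pole_p A p → Spec_pole_p A p (pole_p A p)

-- ===== LEMMAS AND PROOFS =====

-- B-side pure top-two step (no divisibility test)
def pvStep2 (s : Int × Int) (i : Int) : Int × Int :=
  if i > s.1 then (i, s.1)
  else if i > s.2 then (s.1, i)
  else s

theorem pvStep2_nonneg (s : Int × Int) (i : Int) (h1 : 0 ≤ s.1) (h2 : 0 ≤ s.2) :
    0 ≤ (pvStep2 s i).1 ∧ 0 ≤ (pvStep2 s i).2 := by
  unfold pvStep2; split_ifs <;> constructor <;> omega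

theorem pvStep2_comm (z : Int × Int) (x y : Int) :
    pvStep2 (pvStep2 z x) y = pvStep2 (pvStep2 z y) x := by
  obtain ⟨a, b⟩ := z
  simp only [pvStep2]
  split_ifs <;> simp_all [Prod.mk.injEq] <;> omega

-- folding A's step over the raw list = folding the pure step over the filtered list,
-- for any nonnegative state
theorem pvFold_filter (p : Int) (l : List Int) :
    ∀ s : Int × Int, 0 ≤ s.1 → 0 ≤ s.2 →
      l.foldl (pvStepA p) s =
      (l.filter (fun i => decide (PySem.Int.mod i p ≠ 0) && decide (i > 0))).foldl pvStep2 s := by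
  induction l with
  | nil => intro s _ _; rfl
  | cons i l ih =>
    intro s h1 h2
    by_cases hm : PySem.Int.mod i p ≠ 0
    · by_cases hp : i > 0
      · have hf : (fun i => decide (PySem.Int.mod i p ≠ 0) && decide (i > 0)) i = true := by
          simp [hm, hp]
        have hstep : pvStepA p s i = pvStep2 s i := by simp [pvStepA, pvStep2, hm]
        simp only [List.foldl_cons, List.filter_cons, hf, if_pos, List.foldl_cons, hstep]
        exact ih _ (pvStep2_nonneg s i h1 h2).1 (pvStep2_nonneg s i h1 h2).2
      · have hf : (fun i => decide (PySem.Int.mod i p ≠ 0) && decide (i > 0)) i = false := by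
          simp [hp]
        have hstep : pvStepA p s i = s := by
          unfold pvStepA
          split_ifs <;> first | rfl | (exfalso; omega)
        simp only [List.foldl_cons, List.filter_cons, hf, hstep]
        exact ih s h1 h2
    · have hf : (fun i => decide (PySem.Int.mod i p ≠ 0) && decide (i > 0)) i = false := by
        simp [hm]
      have hstep : pvStepA p s i = s := by simp [pvStepA, hm]
      simp only [List.foldl_cons, List.filter_cons, hf, hstep]
      exact ih s h1 h2

-- once every remaining element is ≤ the second component, the fold is frozen
theorem pvFold_frozen (l : List Int) (s : Int × Int) (hss : s.2 ≤ s.1)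
    (hle : ∀ z ∈ l, z ≤ s.2) : l.foldl pvStep2 s = s := by
  induction l with
  | nil => rfl
  | cons x l ih =>
    have hx : x ≤ s.2 := hle x (by simp)
    have hstep : pvStep2 s x = s := by
      unfold pvStep2
      split_ifs <;> first | rfl | (exfalso; omega)
    rw [List.foldl_cons, hstep]
    exact ih (fun z hz => hle z (by simp [hz]))

-- folding the pure step over a descending positive list yields its first two elements
theorem pvFold_sorted (c : List Int) (hpos : ∀ z ∈ c, 0 < z)
    (hdesc : c.Pairwise (fun a b => b ≤ a)) :
    c.foldl pvStep2 (0, 0) =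
      ((match c with | [] => (0 : Int) | x :: _ => x),
       (match c with | _ :: y :: _ => y | _ => (0 : Int))) := by
  match c with
  | [] => rfl
  | [x] =>
    have hx : 0 < x := hpos x (by simp)
    simp [pvStep2, hx]
  | x :: y :: rest =>
    have hx : 0 < x := hpos x (by simp)
    have hy : 0 < y := hpos y (by simp)
    have hyx : y ≤ x := (List.pairwise_cons.1 hdesc).1 y (by simp)
    have hrest : ∀ z ∈ rest, z ≤ y := by
      intro z hz
      exact (List.pairwise_cons.1 (List.pairwise_cons.1 hdesc).2).1 z hz
    have h1 : pvStep2 (0, 0) x = (x, 0) := by simp [pvStep2, hx]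
    have h2 : pvStep2 (x, 0) y = (x, y) := by
      unfold pvStep2
      have : ¬ y > x := by omega
      simp_all
    simp only [List.foldl_cons, h1, h2]
    exact pvFold_frozen rest (x, y) hyx hrest

-- ===== VERDICT (by name: the statement is the Claim_ definition above) =====
theorem pole_p_spec : Claim_equal_pole_p := by
  intro A p _ _
  unfold Spec_pole_p pole_p pole_p_alt
  set f := (fun i => decide (PySem.Int.mod i p ≠ 0) && decide (i > 0)) with hf
  set c := PySem.List.sorted (A.filter f) (fun x => x) true with hc
  have hperm : c.Perm (A.filter f) := PySem.List.sorted_perm _ _ _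
  have hpos : ∀ z ∈ c, 0 < z := by
    intro z hz
    have := hperm.mem_iff.1 hz
    have := List.of_mem_filter this
    simp [hf] at this
    exact this.2
  have hdesc : c.Pairwise (fun a b => b ≤ a) :=
    PySem.List.sorted_pairwise_rev (A.filter f) (fun x => x)
  have e1 : A.foldl (pvStepA p) (0, 0) = (A.filter f).foldl pvStep2 (0, 0) :=
    pvFold_filter p A (0, 0) le_rfl le_rfl
  have e2 : (A.filter f).foldl pvStep2 (0, 0) = c.foldl pvStep2 (0, 0) :=
    (hperm.symm.foldl_eq' (fun x _ y _ z => pvStep2_comm z x y)) (0, 0)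
  rw [e1, e2, pvFold_sorted c hpos hdesc]
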